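-- pv_equiv track=rewrite | github.com/TIZ36/ai-chatbotee | backend/services/media_service.py | get_model_capabilities
-- ===== SOURCE A (Python) =====
-- from typing import Optional, Dict, Any, List
--
-- GEMINI_MODEL_CAPABILITIES: List[Dict[str, Any]] = [
--     # ─── 图像模型 ───
--     {
--         'pattern': 'gemini-2.5-flash-image',
--         'label': 'Gemini 2.5 Flash Image (Nano Banana)',
--         'image': True, 'video': False, 'recommended': True,
--         'note': 'Gemini 2.5 Flash 图像生成（推荐）',
--     },
--     {
--         'pattern': 'gemini-2.0-flash-preview-image-generation',
--         'label': 'Gemini 2.0 Flash Image',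
--         'image': True, 'video': False, 'recommended': True,
--         'note': '2.0 Flash 图像生成预览版',
--     },
--     {
--         'pattern': 'gemini-2.0-flash-exp',
--         'label': 'Gemini 2.0 Flash Exp (Image)',
--         'image': True, 'video': False, 'recommended': False,
--         'note': '实验版，支持图像输出',
--     },
--     {
--         'pattern': 'imagen-3',
--         'label': 'Imagen 3',
--         'image': True, 'video': False, 'recommended': True,
--         'note': 'Google Imagen 3 专用图像模型',
--     },
--     {
--         'pattern': 'imagen-4',
--         'label': 'Imagen 4',
--         'image': True, 'video': False, 'recommended': True,
--         'note': 'Google Imagen 4 最新图像模型',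
--     },
--     # ─── 视频模型 (Veo 系列，通过 Gemini API Key 调用) ───
--     {
--         'pattern': 'veo-2',
--         'label': 'Veo 2',
--         'image': False, 'video': True, 'recommended': True,
--         'note': 'Google Veo 2 视频生成（通过 Gemini API）',
--     },
--     {
--         'pattern': 'veo-3.1',
--         'label': 'Veo 3.1',
--         'image': False, 'video': True, 'recommended': True,
--         'note': 'Google Veo 3.1 最新视频模型，支持参考图、首尾帧、视频续写',
--     },
--     {
--         'pattern': 'veo-3',
--         'label': 'Veo 3',
--         'image': False, 'video': True, 'recommended': True,
--         'note': 'Google Veo 3 视频生成，支持对话和音效',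
--     },
--     # ─── 通用 fallback：模型名含 image 的 ───
--     {
--         'pattern': 'image',
--         'label': 'Gemini Image (通用)',
--         'image': True, 'video': False, 'recommended': False,
--         'note': '模型名含 image 的通用图像模型',
--     },
-- ]
--
-- def get_model_capabilities(model_name: str) -> Dict[str, bool]:
--     """查询模型的媒体能力。返回 {'image': bool, 'video': bool}。"""
--     if not model_name:
--         return {'image': False, 'video': False}
--     name_lower = model_name.lower()
--     # 精确匹配优先（pattern 越长越精确）
--     sorted_caps = sorted(GEMINI_MODEL_CAPABILITIES, key=lambda c: -len(c['pattern']))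
--     for cap in sorted_caps:
--         if cap['pattern'].lower() in name_lower:
--             return {'image': cap.get('image', False), 'video': cap.get('video', False)}
--     return {'image': False, 'video': False}
-- ===== SOURCE B (Python) =====
-- from typing import Optional, Dict, Any, List
--
-- GEMINI_MODEL_CAPABILITIES: List[Dict[str, Any]] = [
--     {'pattern': 'gemini-2.5-flash-image', 'label': 'Gemini 2.5 Flash Image (Nano Banana)',
--      'image': True, 'video': False, 'recommended': True, 'note': 'Gemini 2.5 Flash 图像生成（推荐）'},
--     {'pattern': 'gemini-2.0-flash-preview-image-generation', 'label': 'Gemini 2.0 Flash Image',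
--      'image': True, 'video': False, 'recommended': True, 'note': '2.0 Flash 图像生成预览版'},
--     {'pattern': 'gemini-2.0-flash-exp', 'label': 'Gemini 2.0 Flash Exp (Image)',
--      'image': True, 'video': False, 'recommended': False, 'note': '实验版，支持图像输出'},
--     {'pattern': 'imagen-3', 'label': 'Imagen 3',
--      'image': True, 'video': False, 'recommended': True, 'note': 'Google Imagen 3 专用图像模型'},
--     {'pattern': 'imagen-4', 'label': 'Imagen 4',
--      'image': True, 'video': False, 'recommended': True, 'note': 'Google Imagen 4 最新图像模型'},
--     {'pattern': 'veo-2', 'label': 'Veo 2',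
--      'image': False, 'video': True, 'recommended': True, 'note': 'Google Veo 2 视频生成（通过 Gemini API）'},
--     {'pattern': 'veo-3.1', 'label': 'Veo 3.1',
--      'image': False, 'video': True, 'recommended': True, 'note': 'Google Veo 3.1 最新视频模型，支持参考图、首尾帧、视频续写'},
--     {'pattern': 'veo-3', 'label': 'Veo 3',
--      'image': False, 'video': True, 'recommended': True, 'note': 'Google Veo 3 视频生成，支持对话和音效'},
--     {'pattern': 'image', 'label': 'Gemini Image (通用)',
--      'image': True, 'video': False, 'recommended': False, 'note': '模型名含 image 的通用图像模型'},
-- ]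
--
-- def get_model_capabilities(model_name: str) -> Dict[str, bool]:
--     """One pass over the capability table keeping the longest matching pattern; no sort."""
--     if not model_name:
--         return {'image': False, 'video': False}
--     name_lower = model_name.lower()
--     best = None
--     best_len = -1
--     for cap in GEMINI_MODEL_CAPABILITIES:
--         p = cap['pattern']
--         if len(p) > best_len and p.lower() in name_lower:
--             best = cap
--             best_len = len(p)
--     if best is None:
--         return {'image': False, 'video': False}
--     return {'image': best.get('image', False), 'video': best.get('video', False)}
-- ===== Notes on version B (the rewrite author's own statement) =====
-- stated objective: simpler
-- what changed: Replaced the per-call stable sort of the capability table followed by a first-match scan with a single pass over the table in its original order that keeps the longest matching pattern (strict '>' so ties keep the earliest entry).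
import Mathlib
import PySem

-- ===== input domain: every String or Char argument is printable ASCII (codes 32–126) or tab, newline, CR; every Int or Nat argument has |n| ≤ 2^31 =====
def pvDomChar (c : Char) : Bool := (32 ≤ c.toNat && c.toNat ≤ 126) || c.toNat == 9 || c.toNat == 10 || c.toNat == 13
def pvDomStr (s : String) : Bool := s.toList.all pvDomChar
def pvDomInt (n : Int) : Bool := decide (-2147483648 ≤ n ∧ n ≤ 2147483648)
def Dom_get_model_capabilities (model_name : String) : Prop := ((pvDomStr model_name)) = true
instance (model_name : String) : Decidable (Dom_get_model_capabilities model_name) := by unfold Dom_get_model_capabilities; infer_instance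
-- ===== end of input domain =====

-- B replaces A's per-call sort-then-scan by a single pass keeping the longest matching
-- pattern (strict '>' so ties keep the earliest entry, matching Python's stable sort): simpler.

-- ===== PORT A =====
-- one entry of GEMINI_MODEL_CAPABILITIES (every dict has the same keys, so a structure)
structure Cap where
  pattern : String
  label : String
  image : Bool
  video : Bool
  recommended : Bool
  note : String
deriving DecidableEq, Repr

def cap1 : Cap := ⟨"gemini-2.5-flash-image", "Gemini 2.5 Flash Image (Nano Banana)", true, false, true, "Gemini 2.5 Flash 图像生成（推荐）"⟩
def cap2 : Cap := ⟨"gemini-2.0-flash-preview-image-generation", "Gemini 2.0 Flash Image", true, false, true, "2.0 Flash 图像生成预览版"⟩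
def cap3 : Cap := ⟨"gemini-2.0-flash-exp", "Gemini 2.0 Flash Exp (Image)", true, false, false, "实验版，支持图像输出"⟩
def cap4 : Cap := ⟨"imagen-3", "Imagen 3", true, false, true, "Google Imagen 3 专用图像模型"⟩
def cap5 : Cap := ⟨"imagen-4", "Imagen 4", true, false, true, "Google Imagen 4 最新图像模型"⟩
def cap6 : Cap := ⟨"veo-2", "Veo 2", false, true, true, "Google Veo 2 视频生成（通过 Gemini API）"⟩
def cap7 : Cap := ⟨"veo-3.1", "Veo 3.1", false, true, true, "Google Veo 3.1 最新视频模型，支持参考图、首尾帧、视频续写"⟩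
def cap8 : Cap := ⟨"veo-3", "Veo 3", false, true, true, "Google Veo 3 视频生成，支持对话和音效"⟩
def cap9 : Cap := ⟨"image", "Gemini Image (通用)", true, false, false, "模型名含 image 的通用图像模型"⟩

def GEMINI_MODEL_CAPABILITIES : List Cap :=
  [cap1, cap2, cap3, cap4, cap5, cap6, cap7, cap8, cap9]

-- A's 'for cap in sorted_caps: if … return …' loop
def capLoopA : List Cap → String → List (String × Bool)
  | [], _ => [("image", false), ("video", false)]
  | cap :: rest, name_lower =>
    if PySem.Str.isIn (PySem.Str.lower cap.pattern) name_lower then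
      [("image", cap.image), ("video", cap.video)]
    else capLoopA rest name_lower

def get_model_capabilities (model_name : String) : List (String × Bool) :=
  if model_name.toList = [] then [("image", false), ("video", false)]
  else
    let name_lower := PySem.Str.lower model_name
    let sorted_caps := PySem.List.sorted GEMINI_MODEL_CAPABILITIES
        (fun c => -PySem.Str.len c.pattern) false
    capLoopA sorted_caps name_lower

-- ===== PORT B =====
def get_model_capabilities_alt (model_name : String) : List (String × Bool) :=
  if model_name.toList = [] then [("image", false), ("video", false)]
  else
    let name_lower := PySem.Str.lower model_name
    let best := GEMINI_MODEL_CAPABILITIES.foldl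
      (fun (acc : Option Cap × Int) cap =>
        if decide (PySem.Str.len cap.pattern > acc.2)
            && PySem.Str.isIn (PySem.Str.lower cap.pattern) name_lower
        then (some cap, PySem.Str.len cap.pattern)
        else acc)
      (none, -1)
    match best.1 with
    | none => [("image", false), ("video", false)]
    | some cap => [("image", cap.image), ("video", cap.video)]

-- ===== PRECONDITION & SPEC =====
def Spec_get_model_capabilities (model_name : String) (out : List (String × Bool)) : Prop := out = get_model_capabilities_alt model_name
instance (model_name : String) (out : List (String × Bool)) : Decidable (Spec_get_model_capabilities model_name out) := by unfold Spec_get_model_capabilities; infer_instance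

-- ===== CLAIM (what is proved, stated in full; the proofs are below) =====
def Claim_equal_get_model_capabilities : Prop := ∀ (model_name : String), Dom_get_model_capabilities model_name → Spec_get_model_capabilities model_name (get_model_capabilities model_name)

-- ===== LEMMAS AND PROOFS =====

-- the concrete sorted order A's call produces (stable, descending pattern length)
theorem sorted_caps_eval :
    PySem.List.sorted GEMINI_MODEL_CAPABILITIES (fun c => -PySem.Str.len c.pattern) false =
    [cap2, cap1, cap3, cap4, cap5, cap7, cap6, cap8, cap9] := by decide

-- pattern lengths, evaluated once
theorem strLenLit :
    "gemini-2.5-flash-image".length = 22 ∧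
    "gemini-2.0-flash-preview-image-generation".length = 41 ∧
    "gemini-2.0-flash-exp".length = 20 ∧
    "imagen-3".length = 8 ∧
    "imagen-4".length = 8 ∧
    "veo-2".length = 5 ∧
    "veo-3.1".length = 7 ∧
    "veo-3".length = 5 ∧
    "image".length = 5 := by decide

-- the two loops agree for every lowered name: case analysis on the substring tests in fold
-- order; once a long pattern matches, every later fold step fails its length test, so the
-- remaining tests need no further case split and most branches close early
theorem loops_agree (nl : String) :
    capLoopA [cap2, cap1, cap3, cap4, cap5, cap7, cap6, cap8, cap9] nl =
    (match (GEMINI_MODEL_CAPABILITIES.foldl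
      (fun (acc : Option Cap × Int) cap =>
        if decide (PySem.Str.len cap.pattern > acc.2)
            && PySem.Str.isIn (PySem.Str.lower cap.pattern) nl
        then (some cap, PySem.Str.len cap.pattern)
        else acc)
      (none, -1)).1 with
    | none => [("image", false), ("video", false)]
    | some cap => [("image", cap.image), ("video", cap.video)]) := by
  by_cases h1 : PySem.Chars.isIn (PySem.Chars.lower ('g' :: 'e' :: 'm' :: 'i' :: 'n' :: 'i' :: '-' :: '2' :: '.' :: '5' :: '-' :: 'f' :: 'l' :: 'a' :: 's' :: 'h' :: '-' :: 'i' :: 'm' :: 'a' :: 'g' :: 'e' :: ([] : List Char))) nl.toList = true <;> by_cases h2 : PySem.Chars.isIn (PySem.Chars.lower ('g' :: 'e' :: 'm' :: 'i' :: 'n' :: 'i' :: '-' :: '2' :: '.' :: '0' :: '-' :: 'f' :: 'l' :: 'a' :: 's' :: 'h' :: '-' :: 'p' :: 'r' :: 'e' :: 'v' :: 'i' :: 'e' :: 'w' :: '-' :: 'i' :: 'm' :: 'a' :: 'g' :: 'e' :: '-' :: 'g' :: 'e' :: 'n' :: 'e' :: 'r' :: 'a' :: 't' :: 'i' :: 'o'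 :: 'n' :: ([] : List Char))) nl.toList = true
  · simp [*, GEMINI_MODEL_CAPABILITIES, capLoopA, cap1, cap2, cap3, cap4, cap5, cap6, cap7, cap8, cap9,
          strLenLit.1, strLenLit.2.1, strLenLit.2.2.1, strLenLit.2.2.2.1, strLenLit.2.2.2.2.1,
          strLenLit.2.2.2.2.2.1, strLenLit.2.2.2.2.2.2.1, strLenLit.2.2.2.2.2.2.2.1, strLenLit.2.2.2.2.2.2.2.2]
  · simp [*, GEMINI_MODEL_CAPABILITIES, capLoopA, cap1, cap2, cap3, cap4, cap5, cap6, cap7, cap8, cap9,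
          strLenLit.1, strLenLit.2.1, strLenLit.2.2.1, strLenLit.2.2.2.1, strLenLit.2.2.2.2.1,
          strLenLit.2.2.2.2.2.1, strLenLit.2.2.2.2.2.2.1, strLenLit.2.2.2.2.2.2.2.1, strLenLit.2.2.2.2.2.2.2.2]
  · simp [*, GEMINI_MODEL_CAPABILITIES, capLoopA, cap1, cap2, cap3, cap4, cap5, cap6, cap7, cap8, cap9,
          strLenLit.1, strLenLit.2.1, strLenLit.2.2.1, strLenLit.2.2.2.1, strLenLit.2.2.2.2.1,
          strLenLit.2.2.2.2.2.1, strLenLit.2.2.2.2.2.2.1, strLenLit.2.2.2.2.2.2.2.1, strLenLit.2.2.2.2.2.2.2.2]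
  · by_cases h3 : PySem.Chars.isIn (PySem.Chars.lower ('g' :: 'e' :: 'm' :: 'i' :: 'n' :: 'i' :: '-' :: '2' :: '.' :: '0' :: '-' :: 'f' :: 'l' :: 'a' :: 's' :: 'h' :: '-' :: 'e' :: 'x' :: 'p' :: ([] : List Char))) nl.toList = true
    · simp [*, GEMINI_MODEL_CAPABILITIES, capLoopA, cap1, cap2, cap3, cap4, cap5, cap6, cap7, cap8, cap9,
            strLenLit.1, strLenLit.2.1, strLenLit.2.2.1, strLenLit.2.2.2.1, strLenLit.2.2.2.2.1,
            strLenLit.2.2.2.2.2.1, strLenLit.2.2.2.2.2.2.1, strLenLit.2.2.2.2.2.2.2.1, strLenLit.2.2.2.2.2.2.2.2]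
    · by_cases h4 : PySem.Chars.isIn (PySem.Chars.lower ('i' :: 'm' :: 'a' :: 'g' :: 'e' :: 'n' :: '-' :: '3' :: ([] : List Char))) nl.toList = true
      · simp [*, GEMINI_MODEL_CAPABILITIES, capLoopA, cap1, cap2, cap3, cap4, cap5, cap6, cap7, cap8, cap9,
              strLenLit.1, strLenLit.2.1, strLenLit.2.2.1, strLenLit.2.2.2.1, strLenLit.2.2.2.2.1,
              strLenLit.2.2.2.2.2.1, strLenLit.2.2.2.2.2.2.1, strLenLit.2.2.2.2.2.2.2.1, strLenLit.2.2.2.2.2.2.2.2]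
      · by_cases h5 : PySem.Chars.isIn (PySem.Chars.lower ('i' :: 'm' :: 'a' :: 'g' :: 'e' :: 'n' :: '-' :: '4' :: ([] : List Char))) nl.toList = true
        · simp [*, GEMINI_MODEL_CAPABILITIES, capLoopA, cap1, cap2, cap3, cap4, cap5, cap6, cap7, cap8, cap9,
                strLenLit.1, strLenLit.2.1, strLenLit.2.2.1, strLenLit.2.2.2.1, strLenLit.2.2.2.2.1,
                strLenLit.2.2.2.2.2.1, strLenLit.2.2.2.2.2.2.1, strLenLit.2.2.2.2.2.2.2.1, strLenLit.2.2.2.2.2.2.2.2]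
        · by_cases h7 : PySem.Chars.isIn (PySem.Chars.lower ('v' :: 'e' :: 'o' :: '-' :: '3' :: '.' :: '1' :: ([] : List Char))) nl.toList = true <;> by_cases h6 : PySem.Chars.isIn (PySem.Chars.lower ('v' :: 'e' :: 'o' :: '-' :: '2' :: ([] : List Char))) nl.toList = true
          · simp [*, GEMINI_MODEL_CAPABILITIES, capLoopA, cap1, cap2, cap3, cap4, cap5, cap6, cap7, cap8, cap9,
                  strLenLit.1, strLenLit.2.1, strLenLit.2.2.1, strLenLit.2.2.2.1, strLenLit.2.2.2.2.1,
                  strLenLit.2.2.2.2.2.1, strLenLit.2.2.2.2.2.2.1, strLenLit.2.2.2.2.2.2.2.1, strLenLit.2.2.2.2.2.2.2.2]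
          · simp [*, GEMINI_MODEL_CAPABILITIES, capLoopA, cap1, cap2, cap3, cap4, cap5, cap6, cap7, cap8, cap9,
                  strLenLit.1, strLenLit.2.1, strLenLit.2.2.1, strLenLit.2.2.2.1, strLenLit.2.2.2.2.1,
                  strLenLit.2.2.2.2.2.1, strLenLit.2.2.2.2.2.2.1, strLenLit.2.2.2.2.2.2.2.1, strLenLit.2.2.2.2.2.2.2.2]
          · simp [*, GEMINI_MODEL_CAPABILITIES, capLoopA, cap1, cap2, cap3, cap4, cap5, cap6, cap7, cap8, cap9,
                  strLenLit.1, strLenLit.2.1, strLenLit.2.2.1, strLenLit.2.2.2.1, strLenLit.2.2.2.2.1,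
                  strLenLit.2.2.2.2.2.1, strLenLit.2.2.2.2.2.2.1, strLenLit.2.2.2.2.2.2.2.1, strLenLit.2.2.2.2.2.2.2.2]
          · by_cases h8 : PySem.Chars.isIn (PySem.Chars.lower ('v' :: 'e' :: 'o' :: '-' :: '3' :: ([] : List Char))) nl.toList = true
            · simp [*, GEMINI_MODEL_CAPABILITIES, capLoopA, cap1, cap2, cap3, cap4, cap5, cap6, cap7, cap8, cap9,
                    strLenLit.1, strLenLit.2.1, strLenLit.2.2.1, strLenLit.2.2.2.1, strLenLit.2.2.2.2.1,
                    strLenLit.2.2.2.2.2.1, strLenLit.2.2.2.2.2.2.1, strLenLit.2.2.2.2.2.2.2.1, strLenLit.2.2.2.2.2.2.2.2]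
            · by_cases h9 : PySem.Chars.isIn (PySem.Chars.lower ('i' :: 'm' :: 'a' :: 'g' :: 'e' :: ([] : List Char))) nl.toList = true <;>
                simp [*, GEMINI_MODEL_CAPABILITIES, capLoopA, cap1, cap2, cap3, cap4, cap5, cap6, cap7, cap8, cap9,
                      strLenLit.1, strLenLit.2.1, strLenLit.2.2.1, strLenLit.2.2.2.1, strLenLit.2.2.2.2.1,
                      strLenLit.2.2.2.2.2.1, strLenLit.2.2.2.2.2.2.1, strLenLit.2.2.2.2.2.2.2.1, strLenLit.2.2.2.2.2.2.2.2]

-- ===== VERDICT (by name: the statement is the Claim_ definition above) =====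
theorem get_model_capabilities_spec : Claim_equal_get_model_capabilities := by
  intro s _
  unfold Spec_get_model_capabilities get_model_capabilities get_model_capabilities_alt
  by_cases h : s.toList = []
  · simp [h]
  · simp only [h, if_false]
    rw [sorted_caps_eval]
    exact loops_agree (PySem.Str.lower s)
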